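-- pv_equiv track=rewrite | github.com/Uzemark123/DSA_Visualizer | backend/app/engine/PART02/union_find_allocator.py | allocate_chunks_with_union_find
-- ===== SOURCE A (Python) =====
-- from typing import List, Optional, Tuple
--
-- DesiredPosition = Tuple[int, int]  # (pattern_id, desired_index)
--
-- Placement = Tuple[int, int]  # (slot_index, pattern_id)
--
-- def allocate_chunks_with_union_find(
--     total_slots: int,
--     desired_positions: List[DesiredPosition],
-- ) -> List[Placement]:
--     """
--     Assign each desired pattern chunk to the nearest available slot at or after its target.
--     If that fails (no slots to the right), fall back to the closest free slot before the target.
--     Returns placements as (slot_index, pattern_id).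
--     """
--     parent = list(range(total_slots + 1))  # sentinel at total_slots means "no slot"
--     occupied_slots: List[Optional[int]] = [None] * total_slots
--     placements: List[Placement] = []
--
--     def find(i: int) -> int:
--         while parent[i] != i:
--             parent[i] = parent[parent[i]]
--             i = parent[i]
--         return i
--
--     def occupy(start: int) -> Optional[int]:
--         root = find(start)
--         if root >= total_slots:
--             return None
--         parent[root] = find(root + 1)
--         return root
--
--     for pattern, desired in desired_positions:
--         desired = max(0, min(total_slots - 1, desired))
--
--         slot = occupy(desired)
--         if slot is None:
--             for back in range(desired, -1, -1):
--                 if occupied_slots[back] is None: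
--                     slot = back
--                     parent[back] = find(back + 1)
--                     break
--
--         if slot is None:
--             continue
--
--         occupied_slots[slot] = pattern
--         placements.append((slot, pattern))
--
--     return placements
-- ===== SOURCE B (Python) =====
-- def allocate_chunks_with_union_find(total_slots, desired_positions):
--     """Greedy over an explicit sorted free-slot list: first free slot >= the
--     clamped target, else the last (largest) free slot."""
--     free = list(range(total_slots))
--     placements = []
--     for pattern, desired in desired_positions:
--         if not free:
--             continue
--         target = max(0, min(total_slots - 1, desired))
--         slot = None
--         for x in free:
--             if x >= target:
--                 slot = x
--                 break
--         if slot is None: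
--             slot = free[-1]
--         free.remove(slot)
--         placements.append((slot, pattern))
--     return placements
-- ===== Notes on version B (the rewrite author's own statement) =====
-- stated objective: simpler
-- what changed: Replaces the path-compressing union-find over a parent array plus an occupied array and a backward linear scan by one explicit sorted free-slot list: take the first free slot >= the clamped target, else the last free slot, and delete it from the list.
import Mathlib
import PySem

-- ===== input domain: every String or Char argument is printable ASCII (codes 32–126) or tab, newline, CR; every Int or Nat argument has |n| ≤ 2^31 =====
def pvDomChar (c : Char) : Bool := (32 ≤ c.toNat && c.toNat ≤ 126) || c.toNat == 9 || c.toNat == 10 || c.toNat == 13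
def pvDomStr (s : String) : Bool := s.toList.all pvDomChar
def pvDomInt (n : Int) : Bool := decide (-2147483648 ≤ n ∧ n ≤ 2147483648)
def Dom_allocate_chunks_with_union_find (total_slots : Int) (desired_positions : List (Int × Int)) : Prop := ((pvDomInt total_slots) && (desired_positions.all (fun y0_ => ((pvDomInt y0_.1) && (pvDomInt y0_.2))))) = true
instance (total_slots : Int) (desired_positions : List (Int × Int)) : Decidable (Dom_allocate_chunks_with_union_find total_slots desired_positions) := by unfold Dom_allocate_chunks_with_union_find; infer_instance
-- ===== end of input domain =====

-- B replaces A's union-find + occupied array + backward scan by one sorted free-slot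
-- list (first free slot ≥ target, else the last free slot); objective: simpler.

-- ===== PORT A =====
-- `find`: while parent[i] != i: parent[i] = parent[parent[i]]; i = parent[i].
-- Fuel-bounded recursion (fuel only makes the while-loop total; same computation).
def pvFind (parent : List Int) (fuel : Nat) (i : Int) : List Int × Int :=
  match fuel with
  | 0 => (parent, i)
  | fuel + 1 =>
    let pi := parent.getD i.toNat i
    if pi = i then (parent, i)
    else
      let ppi := parent.getD pi.toNat pi
      pvFind (parent.set i.toNat ppi) fuel ppi

-- `occupy(start)`
def pvOccupy (total_slots : Int) (parent : List Int) (start : Int) :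
    List Int × Option Int :=
  let fr := pvFind parent parent.length start
  if total_slots ≤ fr.2 then (fr.1, none)
  else
    let fr2 := pvFind fr.1 fr.1.length (fr.2 + 1)
    (fr2.1.set fr.2.toNat fr2.2, some fr.2)

-- `for back in range(desired, -1, -1): if occupied_slots[back] is None: …`
def pvBackScan (occ : List (Option Int)) (fuel : Nat) (back : Int) : Option Int :=
  match fuel with
  | 0 => none
  | fuel + 1 =>
    if occ.getD back.toNat (some 0) = none then some back
    else pvBackScan occ fuel (back - 1)

def pvStepA (total_slots : Int) (st : List Int × List (Option Int) × List (Int × Int))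
    (pd : Int × Int) : List Int × List (Option Int) × List (Int × Int) :=
  let d := max 0 (min (total_slots - 1) pd.2)
  let r := pvOccupy total_slots st.1 d
  match r.2 with
  | some s => (r.1, st.2.1.set s.toNat (some pd.1), st.2.2 ++ [(s, pd.1)])
  | none =>
    match pvBackScan st.2.1 (d.toNat + 1) d with
    | some b =>
      let fr := pvFind r.1 r.1.length (b + 1)
      (fr.1.set b.toNat fr.2, st.2.1.set b.toNat (some pd.1), st.2.2 ++ [(b, pd.1)])
    | none => (r.1, st.2.1, st.2.2)

def allocate_chunks_with_union_find (total_slots : Int) (desired_positions : List (Int × Int)) : List (Int × Int) :=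
  (desired_positions.foldl (pvStepA total_slots)
    ((List.range (total_slots.toNat + 1)).map (fun j : Nat => (j : Int)),
     List.replicate total_slots.toNat none, [])).2.2

-- ===== PORT B =====
-- `for x in free: if x >= target: slot = x; break`
def pvFirstGE (free : List Int) (target : Int) : Option Int :=
  match free with
  | [] => none
  | x :: xs => if target ≤ x then some x else pvFirstGE xs target

def pvStepB (total_slots : Int) (st : List Int × List (Int × Int)) (pd : Int × Int) :
    List Int × List (Int × Int) :=
  if st.1 = [] then st
  else
    let target := max 0 (min (total_slots - 1) pd.2)
    let slot := match pvFirstGE st.1 target with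
      | some x => x
      | none => PySem.List.pyGetD st.1 (-1) 0          -- free[-1]
    ((PySem.List.remove? st.1 slot).getD st.1,          -- free.remove(slot); slot ∈ free here
     st.2 ++ [(slot, pd.1)])

def allocate_chunks_with_union_find_alt (total_slots : Int) (desired_positions : List (Int × Int)) : List (Int × Int) :=
  (desired_positions.foldl (pvStepB total_slots)
    ((List.range total_slots.toNat).map (fun j : Nat => (j : Int)), [])).2

-- ===== PRECONDITION & SPEC =====
-- A raises IndexError when total_slots ≤ 0 and the list is non-empty (the fallback
-- scan indexes the empty occupied array); those inputs are excluded.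
def Pre_allocate_chunks_with_union_find (total_slots : Int) (desired_positions : List (Int × Int)) : Prop :=
  desired_positions = [] ∨ 1 ≤ total_slots
instance (total_slots : Int) (desired_positions : List (Int × Int)) : Decidable (Pre_allocate_chunks_with_union_find total_slots desired_positions) := by unfold Pre_allocate_chunks_with_union_find; infer_instance

def pvWitness_allocate_chunks_with_union_find : Int × (List (Int × Int)) := (3, [(1, 1), (2, 5), (3, 0)])

def Spec_allocate_chunks_with_union_find (total_slots : Int) (desired_positions : List (Int × Int)) (out : List (Int × Int)) : Prop := out = allocate_chunks_with_union_find_alt total_slots desired_positions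
instance (total_slots : Int) (desired_positions : List (Int × Int)) (out : List (Int × Int)) : Decidable (Spec_allocate_chunks_with_union_find total_slots desired_positions out) := by unfold Spec_allocate_chunks_with_union_find; infer_instance

-- ===== CLAIM (what is proved, stated in full; the proofs are below) =====
def Claim_equal_allocate_chunks_with_union_find : Prop := ∀ (total_slots : Int) (desired_positions : List (Int × Int)), Dom_allocate_chunks_with_union_find total_slots desired_positions → Pre_allocate_chunks_with_union_find total_slots desired_positions → Spec_allocate_chunks_with_union_find total_slots desired_positions (allocate_chunks_with_union_find total_slots desired_positions)

-- ===== LEMMAS AND PROOFS =====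

-- next free slot at or after j (occ.length when there is none)
def pvNF (occ : List (Option Int)) (j : Nat) : Nat :=
  if h : j < occ.length then
    if occ.getD j (some 0) = none then j else pvNF occ (j + 1)
  else occ.length
termination_by occ.length - j

-- the sorted list of free slots
def pvFree (occ : List (Option Int)) : List Nat :=
  (List.range occ.length).filter (fun j => (occ.getD j (some 0)).isNone)

-- parent-array invariant of A's union-find: every entry points forward, no
-- further than the next free slot, and fixpoints sit on free slots (or the sentinel)
def pvPInv (parent : List Int) (occ : List (Option Int)) : Prop :=
  parent.length = occ.length + 1 ∧
  ∀ i : Nat, i ≤ occ.length → ∃ p : Nat,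
    parent[i]? = some (p : Int) ∧ i ≤ p ∧ p ≤ pvNF occ i ∧ (p = i → pvNF occ i = i)

theorem pvNF_le (occ : List (Option Int)) (j : Nat) : pvNF occ j ≤ occ.length := by
  induction j using pvNF.induct occ with
  | case1 j h hfree => rw [pvNF, dif_pos h, if_pos hfree]; omega
  | case2 j h hocc ih => rw [pvNF, dif_pos h, if_neg hocc]; exact ih
  | case3 j h => rw [pvNF, dif_neg h]

theorem le_pvNF (occ : List (Option Int)) (j : Nat) (hj : j ≤ occ.length) :
    j ≤ pvNF occ j := by
  induction j using pvNF.induct occ with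
  | case1 j h hfree => rw [pvNF, dif_pos h, if_pos hfree]
  | case2 j h hocc ih => rw [pvNF, dif_pos h, if_neg hocc]; have := ih (by omega); omega
  | case3 j h => rw [pvNF, dif_neg h]; omega

theorem pvNF_free (occ : List (Option Int)) (j : Nat) (hlt : pvNF occ j < occ.length) :
    occ.getD (pvNF occ j) (some 0) = none := by
  induction j using pvNF.induct occ with
  | case1 j h hfree => rw [pvNF, dif_pos h, if_pos hfree]; exact hfree
  | case2 j h hocc ih =>
    rw [pvNF, dif_pos h, if_neg hocc] at hlt ⊢; exact ih hlt
  | case3 j h => rw [pvNF, dif_neg h] at hlt; omega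

theorem pvNF_eq_self (occ : List (Option Int)) (j : Nat) (h : j < occ.length)
    (hfree : occ.getD j (some 0) = none) : pvNF occ j = j := by
  rw [pvNF, dif_pos h, if_pos hfree]

theorem pvNF_occupied (occ : List (Option Int)) {j k : Nat} (h1 : j ≤ k)
    (h2 : k < pvNF occ j) : occ.getD k (some 0) ≠ none := by
  induction j using pvNF.induct occ with
  | case1 j h hfree => rw [pvNF, dif_pos h, if_pos hfree] at h2; omega
  | case2 j h hocc ih =>
    rw [pvNF, dif_pos h, if_neg hocc] at h2
    rcases Nat.eq_or_lt_of_le h1 with rfl | hlt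
    · exact hocc
    · exact ih hlt h2
  | case3 j h => rw [pvNF, dif_neg h] at h2; omega

theorem pvNF_le_of_free (occ : List (Option Int)) {j k : Nat} (h1 : j ≤ k)
    (_h2 : k < occ.length) (h3 : occ.getD k (some 0) = none) : pvNF occ j ≤ k := by
  by_contra hc
  exact pvNF_occupied occ h1 (by omega) h3

theorem pvNF_eq_of_between (occ : List (Option Int)) {j k : Nat} (h1 : j ≤ k)
    (h2 : k ≤ pvNF occ j) : pvNF occ k = pvNF occ j := by
  have hA : pvNF occ j ≤ pvNF occ k := by
    rcases lt_or_ge (pvNF occ k) occ.length with h | h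
    · exact pvNF_le_of_free occ (le_trans h1 (le_pvNF occ k (by have := pvNF_le occ j; omega))) h (pvNF_free occ k h)
    · have := pvNF_le occ j; omega
  have hB : pvNF occ k ≤ pvNF occ j := by
    rcases lt_or_ge (pvNF occ j) occ.length with h | h
    · exact pvNF_le_of_free occ h2 h (pvNF_free occ j h)
    · have := pvNF_le occ k; omega
  omega

theorem pvGetD_set_ne (occ : List (Option Int)) {s j : Nat} (h : s ≠ j) (v d : Option Int) :
    (occ.set s v).getD j d = occ.getD j d := by
  simp [List.getD_eq_getElem?_getD, List.getElem?_set_ne h]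

theorem pvNF_set_of_lt (occ : List (Option Int)) (s : Nat) (v : Option Int) :
    ∀ {j : Nat}, s < j → pvNF (occ.set s v) j = pvNF occ j := by
  intro j
  induction j using pvNF.induct occ with
  | case1 j hj hfree =>
    intro h
    have hj' : j < (occ.set s v).length := by simpa using hj
    rw [pvNF, dif_pos hj',
      if_pos (by rw [pvGetD_set_ne occ (by omega : s ≠ j)]; exact hfree),
      pvNF, dif_pos hj, if_pos hfree]
  | case2 j hj hocc ih =>
    intro h
    have hj' : j < (occ.set s v).length := by simpa using hj
    have hL : pvNF (occ.set s v) j = pvNF (occ.set s v) (j + 1) := by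
      rw [pvNF, dif_pos hj',
        if_neg (by rw [pvGetD_set_ne occ (by omega : s ≠ j)]; exact hocc)]
    have hR : pvNF occ j = pvNF occ (j + 1) := by
      rw [pvNF, dif_pos hj, if_neg hocc]
    rw [hL, hR]
    exact ih (by omega)
  | case3 j hj =>
    intro _
    have hj' : ¬ j < (occ.set s v).length := by simpa using hj
    rw [pvNF, dif_neg hj', pvNF, dif_neg hj, List.length_set]

theorem pvNF_le_set (occ : List (Option Int)) (s j : Nat) (x : Int)
    (hj : j ≤ occ.length) : pvNF occ j ≤ pvNF (occ.set s (some x)) j := by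
  by_cases hs : s < occ.length
  · rcases lt_or_ge (pvNF (occ.set s (some x)) j) occ.length with h | h
    · set m := pvNF (occ.set s (some x)) j with hm
      have hmlen : m < (occ.set s (some x)).length := by simp; omega
      have hfree : (occ.set s (some x)).getD m (some 0) = none := pvNF_free _ j hmlen
      have hjm : j ≤ m := le_pvNF _ j (by simp; omega)
      have hms : m ≠ s := by
        intro heq
        rw [heq] at hfree
        simp [List.getD_eq_getElem?_getD, List.getElem?_set_self hs] at hfree
      rw [pvGetD_set_ne occ (Ne.symm hms)] at hfree
      exact pvNF_le_of_free occ hjm h hfree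
    · have := pvNF_le occ j; omega
  · rw [List.set_eq_of_length_le (by omega)]

theorem mem_pvFree (occ : List (Option Int)) (j : Nat) :
    j ∈ pvFree occ ↔ j < occ.length ∧ occ.getD j (some 0) = none := by
  simp [pvFree, List.mem_filter, List.mem_range, Option.isNone_iff_eq_none,
    List.getD_eq_getElem?_getD]

theorem pvFree_pairwise (occ : List (Option Int)) : (pvFree occ).Pairwise (· < ·) :=
  List.Pairwise.filter _ List.pairwise_lt_range

theorem pvFree_nodup (occ : List (Option Int)) : (pvFree occ).Nodup :=
  (pvFree_pairwise occ).imp Nat.ne_of_lt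

theorem pvFree_set (occ : List (Option Int)) {s : Nat} (hs : s < occ.length) (x : Int) :
    pvFree (occ.set s (some x)) = (pvFree occ).filter (fun j => j != s) := by
  unfold pvFree
  rw [List.length_set, List.filter_filter]
  apply List.filter_congr
  intro j hj
  rw [List.mem_range] at hj
  by_cases hjs : j = s
  · subst hjs
    simp [List.getD_eq_getElem?_getD, List.getElem?_set_self hs]
  · simp [List.getD_eq_getElem?_getD, List.getElem?_set_ne (fun h => hjs h.symm), hjs]

-- one unfolding step of the fuelled while-loop
theorem pvFind_succ (parent : List Int) (f : Nat) (i : Int) :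
    pvFind parent (f + 1) i =
      (let pi := parent.getD i.toNat i
       if pi = i then (parent, i)
       else
         let ppi := parent.getD pi.toNat pi
         pvFind (parent.set i.toNat ppi) f ppi) := rfl

-- A's find returns the next free slot at/after i and preserves the invariant
theorem pvFind_spec (occ : List (Option Int)) :
    ∀ (fuel : Nat) (parent : List Int) (k : Nat), pvPInv parent occ → k ≤ occ.length →
      occ.length + 1 - k ≤ fuel →
      (pvFind parent fuel (k : Int)).2 = ((pvNF occ k : Nat) : Int) ∧
      pvPInv (pvFind parent fuel (k : Int)).1 occ := by
  intro fuel
  induction fuel with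
  | zero => intro parent k _ hk hf; omega
  | succ f ih =>
    intro parent k hinv hk hf
    obtain ⟨hlenp, hinv'⟩ := hinv
    obtain ⟨p, hpk, hkp, hple, hproot⟩ := hinv' k hk
    rw [pvFind_succ]
    simp only [Int.toNat_natCast]
    have hget : parent.getD k (k : Int) = (p : Int) := by
      simp [List.getD_eq_getElem?_getD, hpk]
    rw [hget]
    by_cases hpeq : (p : Int) = (k : Int)
    · have hpk' : p = k := by exact_mod_cast hpeq
      rw [if_pos hpeq]
      exact ⟨by simp [hproot hpk'], hlenp, hinv'⟩
    · have hpne : p ≠ k := fun h => hpeq (by exact_mod_cast h)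
      have hklt : k < p := lt_of_le_of_ne hkp (Ne.symm hpne)
      rw [if_neg hpeq]
      have hplen : p ≤ occ.length := le_trans hple (pvNF_le occ k)
      obtain ⟨q, hq, hpq, hqle, -⟩ := hinv' p hplen
      have hget2 : parent.getD ((p : Int)).toNat (p : Int) = (q : Int) := by
        simp [List.getD_eq_getElem?_getD, hq]
      rw [hget2]
      have hNFpk : pvNF occ p = pvNF occ k := pvNF_eq_of_between occ (le_of_lt hklt) hple
      have hqlek : q ≤ pvNF occ k := by rw [← hNFpk]; exact hqle
      have hinv2 : pvPInv (parent.set k (q : Int)) occ := by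
        refine ⟨by simp [hlenp], ?_⟩
        intro m hm
        by_cases hmk : m = k
        · subst hmk
          refine ⟨q, ?_, by omega, hqlek, by omega⟩
          rw [List.getElem?_set_self (show m < parent.length by omega)]
        · obtain ⟨p', hp', h1, h2, h3⟩ := hinv' m hm
          refine ⟨p', ?_, h1, h2, h3⟩
          rw [List.getElem?_set_ne (fun h => hmk h.symm)]
          exact hp'
      obtain ⟨h1, h2⟩ := ih (parent.set k (q : Int)) q hinv2
        (le_trans hqlek (pvNF_le occ k)) (by omega)
      have hNFq : pvNF occ q = pvNF occ k := pvNF_eq_of_between occ (by omega) hqlek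
      rw [hNFq] at h1
      exact ⟨h1, h2⟩

-- occupying a free slot s and redirecting parent[s] to the next free slot
-- preserves the invariant
theorem pvPInv_occupy {parent : List Int} {occ : List (Option Int)} {s : Nat}
    (hinv : pvPInv parent occ) (hs : s < occ.length)
    (hfree : occ.getD s (some 0) = none) (x : Int) :
    pvPInv (parent.set s ((pvNF occ (s + 1) : Nat) : Int)) (occ.set s (some x)) := by
  obtain ⟨hlenp, hinv'⟩ := hinv
  refine ⟨by simp [hlenp], ?_⟩
  intro i hi
  rw [List.length_set] at hi
  by_cases his : i = s
  · subst his
    refine ⟨pvNF occ (i + 1), ?_, le_trans (by omega) (le_pvNF occ (i + 1) (by omega)), ?_, ?_⟩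
    · rw [List.getElem?_set_self (show i < parent.length by omega)]
    · have hset : (occ.set i (some x)).getD i (some 0) = some x := by
        simp [List.getD_eq_getElem?_getD, List.getElem?_set_self hs]
      have h1 : pvNF (occ.set i (some x)) i = pvNF (occ.set i (some x)) (i + 1) := by
        rw [pvNF, dif_pos (by simpa using hs),
          if_neg (by simp [List.getD_eq_getElem?_getD, List.getElem?_set_self hs])]
      rw [h1, pvNF_set_of_lt occ i (some x) (by omega)]
    · intro h; have := le_pvNF occ (i + 1) (by omega); omega
  · obtain ⟨p, hp, h1, h2, h3⟩ := hinv' i hi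
    refine ⟨p, ?_, h1, le_trans h2 (pvNF_le_set occ s i x hi), ?_⟩
    · rw [List.getElem?_set_ne (fun h => his h.symm)]; exact hp
    · intro hpi
      have hNFi := h3 hpi
      rcases Nat.eq_or_lt_of_le hi with heq | hlt
      · rw [pvNF, dif_neg (by simp; omega), List.length_set]; omega
      · have hfi : occ.getD i (some 0) = none := by
          have := pvNF_free occ i (by omega)
          rwa [hNFi] at this
        exact pvNF_eq_self _ i (by simp; omega)
          (by rw [pvGetD_set_ne occ (fun h => his h.symm)]; exact hfi)

theorem pvFirstGE_none {l : List Int} {d : Int} (h : ∀ x ∈ l, x < d) :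
    pvFirstGE l d = none := by
  induction l with
  | nil => rfl
  | cons a t ih =>
    have := h a List.mem_cons_self
    rw [pvFirstGE, if_neg (by omega)]
    exact ih fun x hx => h x (List.mem_cons_of_mem a hx)

theorem pvFirstGE_some {l : List Int} {d x : Int} (hs : l.Pairwise (· < ·))
    (hmem : x ∈ l) (hdx : d ≤ x) (hmin : ∀ y ∈ l, d ≤ y → x ≤ y) :
    pvFirstGE l d = some x := by
  induction l with
  | nil => cases hmem
  | cons a t ih =>
    rw [List.pairwise_cons] at hs
    by_cases hda : d ≤ a
    · have hxa : x ≤ a := hmin a List.mem_cons_self hda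
      have hax : a ≤ x := by
        rcases List.mem_cons.mp hmem with rfl | hmemt
        · exact le_rfl
        · exact le_of_lt (hs.1 x hmemt)
      rw [pvFirstGE, if_pos hda]
      exact congrArg some (le_antisymm hax hxa)
    · rw [pvFirstGE, if_neg hda]
      have hxt : x ∈ t := by
        rcases List.mem_cons.mp hmem with rfl | hmemt
        · omega
        · exact hmemt
      exact ih hs.2 hxt fun y hy hdy => hmin y (List.mem_cons_of_mem a hy) hdy

theorem pvBackScan_succ (occ : List (Option Int)) (f : Nat) (back : Int) :
    pvBackScan occ (f + 1) back =
      (if occ.getD back.toNat (some 0) = none then some back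
       else pvBackScan occ f (back - 1)) := rfl

theorem pvBackScan_none (occ : List (Option Int)) :
    ∀ (fuel : Nat) (back : Int),
      (∀ j : Nat, (j : Int) ≤ max back 0 → occ.getD j (some 0) ≠ none) →
      pvBackScan occ fuel back = none := by
  intro fuel
  induction fuel with
  | zero => intro back _; rfl
  | succ f ih =>
    intro back h
    have h0 : occ.getD back.toNat (some 0) ≠ none := h back.toNat (by omega)
    rw [pvBackScan_succ, if_neg h0]
    exact ih (back - 1) fun j hj =>
      h j (le_trans hj (max_le_max (by omega) le_rfl))

theorem pvBackScan_some (occ : List (Option Int)) :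
    ∀ (fuel : Nat) (d b : Nat), b ≤ d → d + 1 ≤ fuel →
      occ.getD b (some 0) = none →
      (∀ j : Nat, b < j → j ≤ d → occ.getD j (some 0) ≠ none) →
      pvBackScan occ fuel (d : Int) = some (b : Int) := by
  intro fuel
  induction fuel with
  | zero => intro d b _ hf _ _; omega
  | succ f ih =>
    intro d b hbd hf hfree hocc
    rw [pvBackScan_succ]
    simp only [Int.toNat_natCast]
    by_cases hdb : b = d
    · subst hdb; rw [if_pos hfree]
    · rw [if_neg (hocc d (by omega) le_rfl)]
      have hd1 : (d : Int) - 1 = ((d - 1 : Nat) : Int) := by omega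
      rw [hd1]
      exact ih (d - 1) b (by omega) (by omega) hfree fun j h1 h2 => hocc j h1 (by omega)

theorem pvFree_map_pairwise (occ : List (Option Int)) :
    ((pvFree occ).map (fun j : Nat => (j : Int))).Pairwise (· < ·) := by
  rw [List.pairwise_map]
  exact (pvFree_pairwise occ).imp (by intro a b hab; exact_mod_cast hab)

-- removing an allocated slot on B's side matches occupying it on A's side
theorem pvRemove_match (occ : List (Option Int)) {s : Nat} (hs : s < occ.length)
    (x : Int) :
    ((pvFree occ).map (fun j : Nat => (j : Int))).erase ((s : Nat) : Int) =
      (pvFree (occ.set s (some x))).map (fun j : Nat => (j : Int)) := by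
  rw [← List.map_erase (fun a b hab => by exact_mod_cast hab) (pvFree occ),
    List.Nodup.erase_eq_filter (pvFree_nodup occ) s, pvFree_set occ hs x]

theorem pvNF_replicate (n j : Nat) (h : j ≤ n) :
    pvNF (List.replicate n (none : Option Int)) j = j := by
  rcases Nat.eq_or_lt_of_le h with rfl | hlt
  · rw [pvNF, dif_neg (by simp)]; simp
  · exact pvNF_eq_self _ j (by simp [hlt])
      (by simp [List.getD_eq_getElem?_getD, hlt])

theorem pvPInv_init (n : Nat) :
    pvPInv ((List.range (n + 1)).map (fun j : Nat => (j : Int)))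
      (List.replicate n (none : Option Int)) := by
  refine ⟨by simp, ?_⟩
  intro i hi
  rw [List.length_replicate] at hi
  refine ⟨i, ?_, le_rfl, le_of_eq (pvNF_replicate n i hi).symm,
    fun _ => pvNF_replicate n i hi⟩
  simp [Nat.lt_succ_of_le hi]

theorem pvFree_replicate (n : Nat) :
    pvFree (List.replicate n (none : Option Int)) = List.range n := by
  unfold pvFree
  rw [List.length_replicate]
  apply List.filter_eq_self.mpr
  intro j hj
  rw [List.mem_range] at hj
  simp [List.getD_eq_getElem?_getD, hj]

-- one allocation step: A's union-find step and B's free-list step stay coupled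
theorem pvStep_equiv (N : Int) (hN : 1 ≤ N) (parent : List Int)
    (occ : List (Option Int)) (plc : List (Int × Int)) (free : List Int)
    (pd : Int × Int) (hlen : occ.length = N.toNat) (hinv : pvPInv parent occ)
    (hfree : free = (pvFree occ).map (fun j : Nat => (j : Int))) :
    pvPInv (pvStepA N (parent, occ, plc) pd).1 (pvStepA N (parent, occ, plc) pd).2.1 ∧
    (pvStepA N (parent, occ, plc) pd).2.1.length = N.toNat ∧
    (pvStepB N (free, plc) pd).1 =
      (pvFree (pvStepA N (parent, occ, plc) pd).2.1).map (fun j : Nat => (j : Int)) ∧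
    (pvStepA N (parent, occ, plc) pd).2.2 = (pvStepB N (free, plc) pd).2 := by
  have hlenp := hinv.1
  have hn : (occ.length : Int) = N := by omega
  have hd0 : (0 : Int) ≤ max 0 (min (N - 1) pd.2) := le_max_left _ _
  set dn : Nat := (max 0 (min (N - 1) pd.2)).toNat with hdn
  have hdcast : ((dn : Nat) : Int) = max 0 (min (N - 1) pd.2) := by omega
  have hdlt : dn < occ.length := by
    have h1 : min (N - 1) pd.2 ≤ N - 1 := min_le_left _ _
    omega
  obtain ⟨hF2, hFinv⟩ := pvFind_spec occ (occ.length + 1) parent dn hinv (by omega) (by omega)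
  have hFlen := hFinv.1
  by_cases hcase : pvNF occ dn < occ.length
  · -- a free slot at or after the target exists: both take pvNF occ dn
    set sl : Nat := pvNF occ dn with hsl
    have hslfree : occ.getD sl (some 0) = none := pvNF_free occ dn hcase
    obtain ⟨hG2, hGinv⟩ := pvFind_spec occ (occ.length + 1) (pvFind parent (occ.length + 1) ((dn : Nat) : Int)).1
      (sl + 1) hFinv (by omega) (by omega)
    have hOccEq : pvOccupy N parent ((dn : Nat) : Int) =
        ((pvFind (pvFind parent (occ.length + 1) ((dn : Nat) : Int)).1 (occ.length + 1)
            ((sl + 1 : Nat) : Int)).1.set sl ((pvNF occ (sl + 1) : Nat) : Int),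
          some ((sl : Nat) : Int)) := by
      simp only [pvOccupy]
      rw [hlenp, hF2, if_neg (by omega), hFlen,
        show ((sl : Nat) : Int) + 1 = ((sl + 1 : Nat) : Int) by push_cast; ring, hG2]
      simp
    have hAeq : pvStepA N (parent, occ, plc) pd =
        ((pvFind (pvFind parent (occ.length + 1) ((dn : Nat) : Int)).1 (occ.length + 1)
            ((sl + 1 : Nat) : Int)).1.set sl ((pvNF occ (sl + 1) : Nat) : Int),
         occ.set sl (some pd.1), plc ++ [(((sl : Nat) : Int), pd.1)]) := by
      show pvStepA N (parent, occ, plc) pd = _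
      simp only [pvStepA]
      rw [show max 0 (min (N - 1) pd.2) = ((dn : Nat) : Int) from hdcast.symm, hOccEq]
      simp
    have hslmem : ((sl : Nat) : Int) ∈ free := by
      rw [hfree]
      exact List.mem_map_of_mem ((mem_pvFree occ sl).mpr ⟨hcase, hslfree⟩)
    have hfree_ne : free ≠ [] := List.ne_nil_of_mem hslmem
    have hFG : pvFirstGE free ((dn : Nat) : Int) = some ((sl : Nat) : Int) := by
      refine pvFirstGE_some (hfree ▸ pvFree_map_pairwise occ) hslmem
        (by exact_mod_cast le_pvNF occ dn (by omega)) ?_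
      intro y hy hdy
      rw [hfree] at hy
      obtain ⟨k, hk, rfl⟩ := List.mem_map.mp hy
      obtain ⟨hklen, hkfree⟩ := (mem_pvFree occ k).mp hk
      exact_mod_cast pvNF_le_of_free occ (by exact_mod_cast hdy) hklen hkfree
    have hBeq : pvStepB N (free, plc) pd =
        ((pvFree (occ.set sl (some pd.1))).map (fun j : Nat => (j : Int)),
         plc ++ [(((sl : Nat) : Int), pd.1)]) := by
      show pvStepB N (free, plc) pd = _
      simp only [pvStepB]
      rw [if_neg (by simpa using hfree_ne),
        show max 0 (min (N - 1) pd.2) = ((dn : Nat) : Int) from hdcast.symm, hFG]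
      rw [show PySem.List.remove? free ((sl : Nat) : Int) = some (free.erase ((sl : Nat) : Int)) from
        PySem.List.remove?_eq_some_erase free _ hslmem]
      rw [hfree, pvRemove_match occ hcase pd.1]
      simp
    rw [hAeq, hBeq]
    exact ⟨pvPInv_occupy hGinv hcase hslfree pd.1, by simp [hlen], rfl, rfl⟩
  · -- no free slot at or after the target: A scans backwards, B takes the last free slot
    have hNFn : pvNF occ dn = occ.length := by have := pvNF_le occ dn; omega
    have hOccEq : pvOccupy N parent ((dn : Nat) : Int) =
        ((pvFind parent (occ.length + 1) ((dn : Nat) : Int)).1, none) := by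
      simp only [pvOccupy]
      rw [hlenp, hF2, if_pos (by omega)]
    rcases List.eq_nil_or_concat' (pvFree occ) with hnil | ⟨l', b, hcat⟩
    · -- no free slot at all: both skip the request
      have hallocc : ∀ j : Nat, occ.getD j (some 0) ≠ none := by
        intro j hfj
        by_cases hj : j < occ.length
        · have : j ∈ pvFree occ := (mem_pvFree occ j).mpr ⟨hj, hfj⟩
          simp [hnil] at this
        · rw [List.getD_eq_getElem?_getD, List.getElem?_eq_none (by omega)] at hfj
          simp at hfj
      have hAeq : pvStepA N (parent, occ, plc) pd =
          ((pvFind parent (occ.length + 1) ((dn : Nat) : Int)).1, occ, plc) := by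
        show pvStepA N (parent, occ, plc) pd = _
        simp only [pvStepA]
        rw [show max 0 (min (N - 1) pd.2) = ((dn : Nat) : Int) from hdcast.symm, hOccEq,
          pvBackScan_none occ _ _ (fun j _ => hallocc j)]
      have hBeq : pvStepB N (free, plc) pd = (free, plc) := by
        simp only [pvStepB]
        rw [if_pos (by rw [hfree, hnil]; rfl)]
      rw [hAeq, hBeq]
      exact ⟨hFinv, hlen, hfree, rfl⟩
    · -- free slots exist, all before the target: both take the last one, b
      have hbmem : b ∈ pvFree occ := by rw [hcat]; simp
      obtain ⟨hblen, hbfree⟩ := (mem_pvFree occ b).mp hbmem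
      have hmax : ∀ k ∈ pvFree occ, k ≤ b := by
        intro k hk
        have hpw := pvFree_pairwise occ
        rw [hcat] at hk hpw
        obtain ⟨-, -, hrel⟩ := List.pairwise_append.mp hpw
        rcases List.mem_append.mp hk with hkl | hkb
        · exact le_of_lt (hrel k hkl b (by simp))
        · simp at hkb; omega
      have hlt_dn : ∀ k ∈ pvFree occ, k < dn := by
        intro k hk
        obtain ⟨hklen, hkfree⟩ := (mem_pvFree occ k).mp hk
        by_contra hc
        have := pvNF_le_of_free occ (by omega : dn ≤ k) hklen hkfree
        omega
      have hbdn : b < dn := hlt_dn b hbmem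
      have hscan : pvBackScan occ (dn + 1) ((dn : Nat) : Int) = some ((b : Nat) : Int) := by
        refine pvBackScan_some occ (dn + 1) dn b (by omega) le_rfl hbfree ?_
        intro j h1 h2 hfj
        by_cases hj : j < occ.length
        · have := hmax j ((mem_pvFree occ j).mpr ⟨hj, hfj⟩); omega
        · rw [List.getD_eq_getElem?_getD, List.getElem?_eq_none (by omega)] at hfj
          simp at hfj
      obtain ⟨hG2, hGinv⟩ := pvFind_spec occ (occ.length + 1)
        (pvFind parent (occ.length + 1) ((dn : Nat) : Int)).1 (b + 1) hFinv (by omega) (by omega)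
      have hAeq : pvStepA N (parent, occ, plc) pd =
          ((pvFind (pvFind parent (occ.length + 1) ((dn : Nat) : Int)).1 (occ.length + 1)
              ((b + 1 : Nat) : Int)).1.set b ((pvNF occ (b + 1) : Nat) : Int),
           occ.set b (some pd.1), plc ++ [(((b : Nat) : Int), pd.1)]) := by
        show pvStepA N (parent, occ, plc) pd = _
        simp only [pvStepA]
        rw [show max 0 (min (N - 1) pd.2) = ((dn : Nat) : Int) from hdcast.symm, hOccEq]
        simp only [Int.toNat_natCast]
        rw [hscan]
        dsimp only
        rw [hFlen, show ((b : Nat) : Int) + 1 = ((b + 1 : Nat) : Int) by push_cast; ring, hG2]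
        simp
      have hbmem' : ((b : Nat) : Int) ∈ free := by
        rw [hfree]; exact List.mem_map_of_mem hbmem
      have hfree_ne : free ≠ [] := List.ne_nil_of_mem hbmem'
      have hFG : pvFirstGE free ((dn : Nat) : Int) = none := by
        refine pvFirstGE_none ?_
        intro y hy
        rw [hfree] at hy
        obtain ⟨k, hk, rfl⟩ := List.mem_map.mp hy
        exact_mod_cast hlt_dn k hk
      have hlast : PySem.List.pyGetD free (-1) 0 = ((b : Nat) : Int) := by
        rw [hfree, hcat, List.map_append, List.map_singleton]
        exact PySem.List.pyGetD_neg_one_append_singleton _ _ _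
      have hBeq : pvStepB N (free, plc) pd =
          ((pvFree (occ.set b (some pd.1))).map (fun j : Nat => (j : Int)),
           plc ++ [(((b : Nat) : Int), pd.1)]) := by
        show pvStepB N (free, plc) pd = _
        simp only [pvStepB]
        rw [if_neg (by simpa using hfree_ne),
          show max 0 (min (N - 1) pd.2) = ((dn : Nat) : Int) from hdcast.symm, hFG, hlast]
        rw [show PySem.List.remove? free ((b : Nat) : Int) = some (free.erase ((b : Nat) : Int)) from
          PySem.List.remove?_eq_some_erase free _ hbmem']
        rw [hfree, pvRemove_match occ hblen pd.1]
        simp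
      rw [hAeq, hBeq]
      exact ⟨pvPInv_occupy hGinv hblen hbfree pd.1, by simp [hlen], rfl, rfl⟩

theorem pvFold_equiv (N : Int) (hN : 1 ≤ N) :
    ∀ (dps : List (Int × Int)) (parent : List Int) (occ : List (Option Int))
      (free : List Int) (plc : List (Int × Int)),
      occ.length = N.toNat → pvPInv parent occ →
      free = (pvFree occ).map (fun j : Nat => (j : Int)) →
      (dps.foldl (pvStepA N) (parent, occ, plc)).2.2 =
        (dps.foldl (pvStepB N) (free, plc)).2 := by
  intro dps
  induction dps with
  | nil => intro parent occ free plc _ _ _; rfl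
  | cons pd t ih =>
    intro parent occ free plc hlen hinv hfree
    rw [List.foldl_cons, List.foldl_cons]
    obtain ⟨h1, h2, h3, h4⟩ := pvStep_equiv N hN parent occ plc free pd hlen hinv hfree
    have hA : pvStepA N (parent, occ, plc) pd =
        ((pvStepA N (parent, occ, plc) pd).1, (pvStepA N (parent, occ, plc) pd).2.1,
         (pvStepA N (parent, occ, plc) pd).2.2) := rfl
    have hB : pvStepB N (free, plc) pd =
        ((pvStepB N (free, plc) pd).1, (pvStepB N (free, plc) pd).2) := rfl
    rw [hA, hB, ← h4]
    exact ih _ _ _ _ h2 h1 h3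

-- ===== VERDICT (by name: the statement is the Claim_ definition above) =====
theorem allocate_chunks_with_union_find_spec : Claim_equal_allocate_chunks_with_union_find := by
  intro N dps _ hpre
  unfold Spec_allocate_chunks_with_union_find
  rcases hpre with rfl | hN
  · rfl
  · unfold allocate_chunks_with_union_find allocate_chunks_with_union_find_alt
    exact pvFold_equiv N hN dps _ _ _ [] (by simp) (pvPInv_init N.toNat)
      (by rw [pvFree_replicate])
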